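-- pv_equiv track=rewrite | github.com/Creativityliberty/Git_fileordoc | git-library/src/skills/fuzzsuite/plugins/repofuzz/src/layer.py | detect_layer
-- ===== SOURCE A (Python) =====
-- RULES = [
--   ("tests", ["tests","test"]),
--   ("api", ["api","controller","controllers","routes","router","http"]),
--   ("domain", ["domain","model","models","entity","entities","core"]),
--   ("service", ["service","services","use_case","use_cases","application"]),
--   ("infra", ["infra","infrastructure","adapter","adapters","db","database","repository","repositories"]),
--   ("utils", ["utils","common","shared","helpers","lib"]),
-- ]
--
-- def detect_layer(rel_path: str) -> str:
--     rp = rel_path.replace("\\","/").lower()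
--     parts = [p for p in rp.split("/") if p]
--     for layer, cues in RULES:
--         for cue in cues:
--             if cue in parts:
--                 return layer
--     return "unknown"
-- ===== SOURCE B (Python) =====
-- # One pass over the path components, keeping the best (lowest-priority) cue hit.
-- _RULES = [
--   ("tests", ["tests","test"]),
--   ("api", ["api","controller","controllers","routes","router","http"]),
--   ("domain", ["domain","model","models","entity","entities","core"]),
--   ("service", ["service","services","use_case","use_cases","application"]),
--   ("infra", ["infra","infrastructure","adapter","adapters","db","database","repository","repositories"]),
--   ("utils", ["utils","common","shared","helpers","lib"]),
-- ]
-- _CUES = {cue: (i, layer) for i, (layer, cues) in enumerate(_RULES) for cue in cues}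
--
-- def detect_layer(rel_path: str) -> str:
--     best = None
--     for part in rel_path.replace("\\", "/").lower().split("/"):
--         hit = _CUES.get(part)
--         if hit is not None and (best is None or hit[0] < best[0]):
--             best = hit
--     return best[1] if best is not None else "unknown"
-- ===== Notes on version B (the rewrite author's own statement) =====
-- stated objective: alternative
-- what changed: Replaced the rules-then-cues nested scan with early return by a precomputed cue->(priority,layer) dict and a single pass over the path components keeping the minimum priority.
import Mathlib
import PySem

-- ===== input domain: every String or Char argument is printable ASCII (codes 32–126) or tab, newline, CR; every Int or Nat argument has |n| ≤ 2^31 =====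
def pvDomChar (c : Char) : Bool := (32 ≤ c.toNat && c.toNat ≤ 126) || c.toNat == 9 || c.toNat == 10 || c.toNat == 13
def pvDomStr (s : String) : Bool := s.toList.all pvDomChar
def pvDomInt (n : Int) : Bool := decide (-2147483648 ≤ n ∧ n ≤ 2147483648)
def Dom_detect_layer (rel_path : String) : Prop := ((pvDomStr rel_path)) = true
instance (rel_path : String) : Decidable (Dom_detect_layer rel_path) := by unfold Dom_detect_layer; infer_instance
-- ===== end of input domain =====

set_option maxRecDepth 8192


-- B replaces A's nested rules/cues scan (early return on the first matching rule) by one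
-- pass over the path components with a precomputed cue->(priority, layer) map, keeping
-- the lowest priority seen.

-- ===== PORT A =====
def pvRules : List (String × List String) :=
  [("tests", ["tests","test"]),
   ("api", ["api","controller","controllers","routes","router","http"]),
   ("domain", ["domain","model","models","entity","entities","core"]),
   ("service", ["service","services","use_case","use_cases","application"]),
   ("infra", ["infra","infrastructure","adapter","adapters","db","database","repository","repositories"]),
   ("utils", ["utils","common","shared","helpers","lib"])]

-- inner loop: "for cue in cues: if cue in parts: return layer" (whether any cue hit)
def pvCueHit : List String → List String → Bool
  | [], _ => false
  | c :: cs, parts => if parts.contains c then true else pvCueHit cs parts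

-- outer loop over RULES with early return
def pvRuleLoop : List (String × List String) → List String → String
  | [], _ => "unknown"
  | (layer, cues) :: rest, parts =>
      if pvCueHit cues parts then layer else pvRuleLoop rest parts

def detect_layer (rel_path : String) : String :=
  let rp := PySem.Str.lower (PySem.Str.replace rel_path "\\" "/")
  let parts := ((PySem.Str.split? rp "/").getD []).filter (fun p => p ≠ "")  -- sep "/" ≠ "", split? is always some
  pvRuleLoop pvRules parts

-- ===== PORT B =====
-- _RULES with the enumerate indices: (i, layer, cues)
def pvTable : List (Int × String × List String) :=
  [((0 : Int), "tests", ["tests","test"]),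
   ((1 : Int), "api", ["api","controller","controllers","routes","router","http"]),
   ((2 : Int), "domain", ["domain","model","models","entity","entities","core"]),
   ((3 : Int), "service", ["service","services","use_case","use_cases","application"]),
   ((4 : Int), "infra", ["infra","infrastructure","adapter","adapters","db","database","repository","repositories"]),
   ((5 : Int), "utils", ["utils","common","shared","helpers","lib"])]

-- _CUES = {cue: (i, layer) for i, (layer, cues) in enumerate(_RULES) for cue in cues}
def pvCues : PySem.Dict String (Int × String) :=
  PySem.Dict.ofList (pvTable.flatMap (fun r => r.2.2.map (fun c => (c, (r.1, r.2.1)))))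

-- loop body: hit = _CUES.get(part); if hit is not None and (best is None or hit[0] < best[0]): best = hit
def pvStep (best : Option (Int × String)) (part : String) : Option (Int × String) :=
  match PySem.Dict.get? pvCues part with
  | none => best
  | some hit =>
      match best with
      | none => some hit
      | some b => if hit.1 < b.1 then some hit else some b

def detect_layer_alt (rel_path : String) : String :=
  let parts := (PySem.Str.split? (PySem.Str.lower (PySem.Str.replace rel_path "\\" "/")) "/").getD []  -- sep "/" ≠ ""
  match parts.foldl pvStep none with
  | some best => best.2
  | none => "unknown"

-- ===== PRECONDITION & SPEC =====
def Spec_detect_layer (rel_path : String) (out : String) : Prop := out = detect_layer_alt rel_path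
instance (rel_path : String) (out : String) : Decidable (Spec_detect_layer rel_path out) := by unfold Spec_detect_layer; infer_instance

-- ===== CLAIM (what is proved, stated in full; the proofs are below) =====
def Claim_equal_detect_layer : Prop := ∀ (rel_path : String), Dom_detect_layer rel_path → Spec_detect_layer rel_path (detect_layer rel_path)

-- ===== LEMMAS AND PROOFS =====

-- lookup in the cue dict
def pvLk (p : String) : Option (Int × String) := PySem.Dict.get? pvCues p

-- left-preferring minimum-by-priority combine (the effect of one loop step on best)
def pvOmin (a v : Option (Int × String)) : Option (Int × String) :=
  match v with
  | none => a
  | some hit =>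
      match a with
      | none => some hit
      | some b => if hit.1 < b.1 then some hit else some b

-- first rule of the table hit by any part of xs (what A's nested scan computes)
def pvSpecR : List (Int × String × List String) → List String → Option (Int × String)
  | [], _ => none
  | (i, layer, cues) :: rest, xs =>
      if pvCueHit cues xs then some (i, layer) else pvSpecR rest xs

-- first rule of the table whose cues contain x (what the dict lookup computes)
def pvLkR : List (Int × String × List String) → String → Option (Int × String)
  | [], _ => none
  | (i, layer, cues) :: rest, x =>
      if cues.contains x then some (i, layer) else pvLkR rest x

lemma pvOmin_none_left (v : Option (Int × String)) : pvOmin none v = v := by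
  cases v <;> rfl

lemma pvOmin_assoc (a u v : Option (Int × String)) :
    pvOmin (pvOmin a u) v = pvOmin a (pvOmin u v) := by
  cases v with
  | none => rfl
  | some v =>
    cases u with
    | none => rfl
    | some u =>
      cases a with
      | none =>
          simp only [pvOmin]
          split <;> rfl
      | some a =>
          by_cases h1 : u.1 < a.1 <;> by_cases h2 : v.1 < u.1 <;> by_cases h3 : v.1 < a.1 <;>
            simp [pvOmin, h1, h2, h3] <;> omega

lemma pvStep_eq (best : Option (Int × String)) (p : String) :
    pvStep best p = pvOmin best (pvLk p) := by
  unfold pvStep pvOmin pvLk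
  cases PySem.Dict.get? pvCues p <;> cases best <;> rfl

lemma pvCueHit_nil (cues : List String) : pvCueHit cues [] = false := by
  induction cues with
  | nil => rfl
  | cons c cs ih => simp [pvCueHit, ih]

lemma pvCueHit_or (c : String) (cs ys : List String) :
    pvCueHit (c :: cs) ys = (ys.contains c || pvCueHit cs ys) := by
  cases h : ys.contains c <;> simp only [pvCueHit, h] <;> simp

lemma pvCueHit_cons (cues : List String) (x : String) (xs : List String) :
    pvCueHit cues (x :: xs) = (cues.contains x || pvCueHit cues xs) := by
  induction cues with
  | nil => simp [pvCueHit]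
  | cons c cs ih =>
      rw [pvCueHit_or, pvCueHit_or, ih, List.contains_cons, List.contains_cons]
      rw [show (x == c) = (c == x) from Bool.beq_comm]
      cases (c == x) <;> cases xs.contains c <;> cases cs.contains x <;> cases pvCueHit cs xs <;> rfl

lemma pvCueHit_filter (cues xs : List String) (h : ∀ c ∈ cues, c ≠ "") :
    pvCueHit cues (xs.filter (fun p => p ≠ "")) = pvCueHit cues xs := by
  induction cues with
  | nil => rfl
  | cons c cs ih =>
      have hc : c ≠ "" := h c (by simp)
      rw [pvCueHit_or, pvCueHit_or, ih (fun c hm => h c (by simp [hm]))]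
      simp [List.contains_eq_mem, List.mem_filter, hc]

lemma pvSpecR_some_pri (rs : List (Int × String × List String)) (xs : List String)
    (b : Int × String) (h : pvSpecR rs xs = some b) : ∃ r ∈ rs, r.1 = b.1 := by
  induction rs with
  | nil => simp [pvSpecR] at h
  | cons r rest ih =>
      obtain ⟨i, l, cs⟩ := r
      rw [pvSpecR] at h
      split_ifs at h with hc
      · exact ⟨(i, l, cs), by simp, by cases h; rfl⟩
      · obtain ⟨r', hm, he⟩ := ih h
        exact ⟨r', by simp [hm], he⟩

lemma pvLkR_some_pri (rs : List (Int × String × List String)) (x : String)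
    (b : Int × String) (h : pvLkR rs x = some b) : ∃ r ∈ rs, r.1 = b.1 := by
  induction rs with
  | nil => simp [pvLkR] at h
  | cons r rest ih =>
      obtain ⟨i, l, cs⟩ := r
      rw [pvLkR] at h
      split_ifs at h with hc
      · exact ⟨(i, l, cs), by simp, by cases h; rfl⟩
      · obtain ⟨r', hm, he⟩ := ih h
        exact ⟨r', by simp [hm], he⟩

-- the key step: on a priority-sorted table, prepending a part combines by pvOmin
lemma pvSpecR_cons (rs : List (Int × String × List String))
    (hp : rs.Pairwise (fun a b => a.1 < b.1)) (x : String) (xs : List String) :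
    pvSpecR rs (x :: xs) = pvOmin (pvLkR rs x) (pvSpecR rs xs) := by
  induction rs with
  | nil => rfl
  | cons r rest ih =>
      obtain ⟨i, l, cs⟩ := r
      obtain ⟨hlt, hrest⟩ := List.pairwise_cons.mp hp
      rw [pvSpecR, pvSpecR, pvLkR, pvCueHit_cons]
      by_cases hx : cs.contains x = true
      · rw [hx, if_pos rfl, Bool.true_or, if_pos rfl]
        by_cases hh : pvCueHit cs xs = true
        · rw [if_pos hh]
          simp [pvOmin]
        · rw [if_neg hh]
          cases hs : pvSpecR rest xs with
          | none => rfl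
          | some b =>
              obtain ⟨r', hm, he⟩ := pvSpecR_some_pri rest xs b hs
              have hib : i < b.1 := he ▸ hlt r' hm
              simp only [pvOmin]
              rw [if_neg (by omega)]
      · rw [Bool.not_eq_true] at hx
        rw [hx, Bool.false_or, if_neg (show ¬(false = true) by simp)]
        by_cases hh : pvCueHit cs xs = true
        · rw [if_pos hh, if_pos hh]
          cases hk : pvLkR rest x with
          | none => rfl
          | some c =>
              obtain ⟨r', hm, he⟩ := pvLkR_some_pri rest x c hk
              have hic : i < c.1 := he ▸ hlt r' hm
              simp only [pvOmin]
              rw [if_pos (by omega)]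
        · rw [if_neg hh, if_neg hh]
          exact ih hrest

lemma pvSpecR_nil_parts (rs : List (Int × String × List String)) : pvSpecR rs [] = none := by
  induction rs with
  | nil => rfl
  | cons r rest ih =>
      obtain ⟨i, l, cs⟩ := r
      rw [pvSpecR, pvCueHit_nil, ih]
      rfl

-- dict-lookup lemmas: get? on the flattened table is pvLkR
lemma pvGet_mk_append (l1 l2 : List (String × Int × String)) (x : String) :
    (PySem.Dict.mk (l1 ++ l2)).get? x =
      (match (PySem.Dict.mk l1).get? x with
       | some v => some v
       | none => (PySem.Dict.mk l2).get? x) := by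
  induction l1 with
  | nil => rfl
  | cons p t ih =>
      obtain ⟨k, v⟩ := p
      rw [List.cons_append, PySem.Dict.get?_mk_cons, PySem.Dict.get?_mk_cons]
      cases k == x <;> simp [ih]

lemma pvGet_mk_map (cs : List String) (v : Int × String) (x : String) :
    (PySem.Dict.mk (cs.map (fun c => (c, v)))).get? x =
      (if cs.contains x then some v else none) := by
  induction cs with
  | nil => rfl
  | cons c t ih =>
      rw [List.map_cons, PySem.Dict.get?_mk_cons, List.contains_cons]
      rw [show (c == x) = (x == c) from Bool.beq_comm]
      cases x == c <;> simp [ih]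

lemma pvGet_flat (rs : List (Int × String × List String)) (x : String) :
    (PySem.Dict.mk (rs.flatMap (fun r => r.2.2.map (fun c => (c, (r.1, r.2.1)))))).get? x
      = pvLkR rs x := by
  induction rs with
  | nil => rfl
  | cons r rest ih =>
      obtain ⟨i, l, cs⟩ := r
      rw [List.flatMap_cons, pvGet_mk_append, pvGet_mk_map, pvLkR, ih]
      cases h : cs.contains x <;> simp

lemma pvLk_eval (x : String) : pvLk x = pvLkR pvTable x := by
  have h : pvCues = PySem.Dict.mk
      (pvTable.flatMap (fun r => r.2.2.map (fun c => (c, (r.1, r.2.1))))) := by rfl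
  rw [pvLk, h, pvGet_flat]

lemma pvFoldl_step (xs : List String) : ∀ acc,
    List.foldl pvStep acc xs = pvOmin acc (pvSpecR pvTable xs) := by
  induction xs with
  | nil =>
      intro acc
      rw [List.foldl_nil, pvSpecR_nil_parts]
      rfl
  | cons x xs ih =>
      intro acc
      rw [List.foldl_cons, ih, pvStep_eq, pvLk_eval, pvOmin_assoc,
        ← pvSpecR_cons pvTable (by decide)]

-- A's rule scan over the same table
lemma pvRuleLoop_eq_specR (rs : List (Int × String × List String)) (ys : List String) :
    pvRuleLoop (rs.map (fun r => (r.2.1, r.2.2))) ys =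
      (match pvSpecR rs ys with
       | some b => b.2
       | none => "unknown") := by
  induction rs with
  | nil => rfl
  | cons r rest ih =>
      obtain ⟨i, l, cs⟩ := r
      rw [List.map_cons, pvRuleLoop, pvSpecR]
      cases h : pvCueHit cs ys <;> simp [ih]

lemma pvRuleLoop_filter (rules : List (String × List String)) (ys : List String)
    (h : ∀ r ∈ rules, ∀ c ∈ r.2, c ≠ "") :
    pvRuleLoop rules (ys.filter (fun p => p ≠ "")) = pvRuleLoop rules ys := by
  induction rules with
  | nil => rfl
  | cons r rest ih =>
      obtain ⟨l, cs⟩ := r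
      rw [pvRuleLoop, pvRuleLoop, pvCueHit_filter cs ys (fun c hc => h (l, cs) (by simp) c hc),
        ih (fun r hr => h r (by simp [hr]))]

-- ===== VERDICT (by name: the statement is the Claim_ definition above) =====
theorem detect_layer_spec : Claim_equal_detect_layer := by
  intro rel_path _
  unfold Spec_detect_layer detect_layer detect_layer_alt
  dsimp only
  rw [pvFoldl_step, pvOmin_none_left, pvRuleLoop_filter pvRules _ (by decide),
    show pvRules = pvTable.map (fun r => (r.2.1, r.2.2)) from rfl,
    pvRuleLoop_eq_specR]
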